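-- pv_equiv track=rewrite | github.com/alexandraback/datacollection | solutions_2751486_0/Python/Callum/small.py | nvalue
-- ===== SOURCE A (Python) =====
-- vowels='aeiou'
--
-- def nvalue(name,n):
-- 	ans=0
-- 	consecutive=[]
-- 	for i in range(len(name)):
-- 		if i<=len(name)-n:
-- 			t=name[i:i+n]
-- 			for v in vowels:
-- 				if v in t:
-- 					break
-- 			else:
-- 				consecutive.append(i)
-- 	for i in range(len(name)-n+1):
-- 		for j in range(i+n,len(name)+1):
-- 			for c in consecutive:
-- 				if c>=i and c+n<=j:
-- 					ans+=1
-- 					break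
-- 	return ans
-- ===== SOURCE B (Python) =====
-- def nvalue(name, n):
--     L = len(name)
--     starts = []
--     run = 0
--     for j, ch in enumerate(name):
--         run = 0 if ch in 'aeiou' else run + 1
--         if run >= n:
--             starts.append(j - n + 1)
--     total = 0
--     prev = -1
--     for c in starts:
--         total += (c - prev) * (L - n + 1 - c)
--         prev = c
--     return total
-- ===== Notes on version B (the rewrite author's own statement) =====
-- stated objective: faster
-- what changed: B finds the vowel-free window starts with a single sliding consonant-run counter (instead of slicing and scanning each window) and replaces A's double loop over all (i,j) pairs with an inner scan of the start list by a closed-form sum: each start c, first for i in (prev, c], contributes (c - prev) * (L - n + 1 - c).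
-- outside the precondition, e.g. on nvalue('ab', -1): A returns 6, B returns 7
import Mathlib
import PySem

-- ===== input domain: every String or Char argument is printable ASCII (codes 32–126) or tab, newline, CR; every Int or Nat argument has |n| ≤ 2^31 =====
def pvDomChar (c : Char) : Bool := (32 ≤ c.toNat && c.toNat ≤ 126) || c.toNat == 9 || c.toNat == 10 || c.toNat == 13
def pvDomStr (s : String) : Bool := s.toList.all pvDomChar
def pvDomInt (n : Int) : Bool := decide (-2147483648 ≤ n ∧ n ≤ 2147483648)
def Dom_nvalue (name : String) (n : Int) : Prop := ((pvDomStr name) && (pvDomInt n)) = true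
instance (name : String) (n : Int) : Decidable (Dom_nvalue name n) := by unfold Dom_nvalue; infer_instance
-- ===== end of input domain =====

-- B finds vowel-free window starts with a sliding consonant-run scan and replaces A's double
-- loop over all (i, j) pairs (with an inner scan) by a closed-form sum over those starts
-- (objective: faster).

-- ===== PORT A =====
def nvalue (name : String) (n : Int) : Int :=
  let s := name.toList
  let L : Int := (s.length : Int)
  let consecutive : List Int :=
    (PySem.List.pyRange 0 L 1).foldl (fun acc i =>
      if i ≤ L - n then
        -- t = name[i:i+n]; for v in vowels: if v in t: break / else: append i
        if ("aeiou".toList).any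
            (fun v => PySem.Chars.isIn [v] (PySem.List.slice s (some i) (some (i + n)))) then
          acc
        else acc ++ [i]
      else acc) []
  (PySem.List.pyRange 0 (L - n + 1) 1).foldl (fun ans i =>
    (PySem.List.pyRange (i + n) (L + 1) 1).foldl (fun ans2 j =>
      -- for c in consecutive: if c >= i and c + n <= j: ans += 1; break
      if consecutive.any (fun c => decide (i ≤ c) && decide (c + n ≤ j)) then ans2 + 1
      else ans2) ans) 0

-- ===== PORT B =====
def nvalue_alt (name : String) (n : Int) : Int :=
  let s := name.toList
  let L : Int := (s.length : Int)
  let rs :=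
    (PySem.List.enumerate s 0).foldl (fun st p =>
      let run : Int := if PySem.Chars.isIn [p.2] "aeiou".toList then 0 else st.1 + 1
      let starts := if n ≤ run then st.2 ++ [p.1 - n + 1] else st.2
      (run, starts)) ((0 : Int), ([] : List Int))
  (rs.2.foldl (fun tp c => (tp.1 + (c - tp.2) * (L - n + 1 - c), c)) ((0 : Int), (-1 : Int))).1

-- ===== PRECONDITION & SPEC =====
-- Pre_ restricts to the natural domain of a positive window length n ≥ 1: for n ≤ 0 Python's
-- empty/negative-stop slices make A's count an accident of slice semantics (and A's loop ranges
-- explode for negative n); B's sliding-window scan does not reproduce it (its values coincide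
-- with A's on some such inputs only incidentally).
def Pre_nvalue (name : String) (n : Int) : Prop := 1 ≤ n
instance (name : String) (n : Int) : Decidable (Pre_nvalue name n) := by
  unfold Pre_nvalue; infer_instance

def pvWitness_nvalue : String × Int := ("bcd", 2)

def Spec_nvalue (name : String) (n : Int) (out : Int) : Prop := out = nvalue_alt name n
instance (name : String) (n : Int) (out : Int) : Decidable (Spec_nvalue name n out) := by
  unfold Spec_nvalue; infer_instance

-- ===== CLAIM (what is proved, stated in full; the proofs are below) =====
def Claim_equal_nvalue : Prop :=
  ∀ (name : String) (n : Int), Dom_nvalue name n → Pre_nvalue name n →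
    Spec_nvalue name n (nvalue name n)

-- ===== LEMMAS AND PROOFS =====

-- B's vowel-free test for the window starting at i (as a predicate on i).
def vfB (s : List Char) (n : Int) (i : Int) : Bool :=
  (PySem.List.slice s (some i) (some (i + n))).all
    (fun ch => !(PySem.Chars.isIn [ch] "aeiou".toList))

-- value A's inner double loop contributes for a fixed outer index i
def gN (L n : Int) (cs : List Int) (i : Int) : Int :=
  match cs.find? (fun c => decide (i ≤ c)) with
  | some c0 => L - n + 1 - c0
  | none => 0

-- consonant test (the character is not a vowel)
def consP (ch : Char) : Bool := !(PySem.Chars.isIn [ch] "aeiou".toList)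

-- length of the longest all-consonant suffix (B's running counter)
def runC (s : List Char) : Nat := (s.reverse.takeWhile consP).length

lemma singleton_infix_iff {α : Type} (a : α) (l : List α) : [a] <:+: l ↔ a ∈ l := by
  constructor
  · intro h
    exact h.sublist.subset (List.mem_singleton_self a)
  · intro h
    obtain ⟨u, v, rfl⟩ := List.append_of_mem h
    exact ⟨u, v, by simp⟩

lemma anyV_eq (t : List Char) :
    (("aeiou".toList).any (fun v => PySem.Chars.isIn [v] t))
      = !(t.all fun ch => !(PySem.Chars.isIn [ch] "aeiou".toList)) := by
  rw [Bool.eq_iff_iff]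
  simp only [List.any_eq_true, Bool.not_eq_true', List.all_eq_false,
    PySem.Chars.isIn_iff_infix, singleton_infix_iff, Bool.not_eq_false]
  constructor
  · rintro ⟨v, hv, hvt⟩; exact ⟨v, hvt, hv⟩
  · rintro ⟨c, hct, hc⟩; exact ⟨c, hc, hct⟩

lemma foldl_id {α β : Type} (l : List β) (a : α) : l.foldl (fun x _ => x) a = a := by
  induction l generalizing a with
  | nil => rfl
  | cons b l ih => exact ih a

lemma consA_eq (s : List Char) (n : Int) (hn : 1 ≤ n) :
    ((PySem.List.pyRange 0 (s.length : Int) 1).foldl (fun acc i =>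
      if i ≤ (s.length : Int) - n then
        if ("aeiou".toList).any
            (fun v => PySem.Chars.isIn [v] (PySem.List.slice s (some i) (some (i + n)))) then
          acc
        else acc ++ [i]
      else acc) [])
    = (PySem.List.pyRange 0 ((s.length : Int) - n + 1) 1).filter (vfB s n) := by
  have hstep : ∀ (acc : List Int), ∀ i ∈ PySem.List.pyRange 0 (s.length : Int) 1,
      (if i ≤ (s.length : Int) - n then
        if ("aeiou".toList).any
            (fun v => PySem.Chars.isIn [v] (PySem.List.slice s (some i) (some (i + n)))) then
          acc
        else acc ++ [i]
      else acc)
      = (if (decide (i ≤ (s.length : Int) - n) && vfB s n i) = true then acc ++ [i] else acc) := by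
    intro acc i _
    rw [anyV_eq]
    have hfold : ((PySem.List.slice s (some i) (some (i + n))).all
        (fun ch => !(PySem.Chars.isIn [ch] "aeiou".toList))) = vfB s n i := rfl
    rw [hfold]
    by_cases h1 : i ≤ (s.length : Int) - n
    · cases vfB s n i <;> simp [h1]
    · simp [h1]
  rw [List.foldl_ext _ _ _ hstep, PySem.List.foldl_append_if _ (fun i => i)]
  simp only [List.map_id_fun', id, List.nil_append]
  by_cases hm : (s.length : Int) - n + 1 ≤ 0
  · rw [PySem.List.pyRange_one_eq_nil hm, List.filter_nil, List.filter_eq_nil_iff]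
    intro i hi
    rw [PySem.List.mem_pyRange_one] at hi
    simp only [Bool.and_eq_true, decide_eq_true_eq, not_and]
    intro h; omega
  · rw [PySem.List.pyRange_one_append 0 ((s.length : Int) - n + 1) (s.length : Int)
        (by omega) (by omega), List.filter_append]
    have h2 : (PySem.List.pyRange ((s.length : Int) - n + 1) (s.length : Int) 1).filter
        (fun i => decide (i ≤ (s.length : Int) - n) && vfB s n i) = [] := by
      rw [List.filter_eq_nil_iff]
      intro i hi
      rw [PySem.List.mem_pyRange_one] at hi
      simp only [Bool.and_eq_true, decide_eq_true_eq, not_and]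
      intro h; omega
    rw [h2, List.append_nil]
    apply List.filter_congr
    intro i hi
    rw [PySem.List.mem_pyRange_one] at hi
    simp [show i ≤ (s.length : Int) - n by omega]

lemma find?_min : ∀ (cs : List Int), cs.Pairwise (· < ·) → ∀ (i c0 : Int),
    cs.find? (fun c => decide (i ≤ c)) = some c0 → ∀ c ∈ cs, i ≤ c → c0 ≤ c := by
  intro cs
  induction cs with
  | nil => intro _ i c0 h; simp at h
  | cons a tl ih =>
    intro hs i c0 h c hc hic
    by_cases ha : i ≤ a
    · rw [List.find?_cons_of_pos (by simpa using ha)] at h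
      injection h with h; subst h
      rcases List.mem_cons.mp hc with rfl | hc'
      · exact le_refl _
      · exact le_of_lt (List.rel_of_pairwise_cons hs hc')
    · rw [List.find?_cons_of_neg (by simpa using ha)] at h
      rcases List.mem_cons.mp hc with rfl | hc'
      · exact absurd hic ha
      · exact ih hs.of_cons i c0 h c hc' hic

lemma sum_ind (a b m : Int) (h1 : a ≤ m) (h2 : m ≤ b) :
    ((PySem.List.pyRange a b 1).map (fun j => if m ≤ j then (1 : Int) else 0)).sum = b - m := by
  rw [PySem.List.pyRange_one_append a m b h1 h2, List.map_append, List.sum_append]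
  have e1 : (PySem.List.pyRange a m 1).map (fun j => if m ≤ j then (1 : Int) else 0)
      = (PySem.List.pyRange a m 1).map (fun _ => (0 : Int)) := by
    apply List.map_congr_left
    intro j hj
    rw [PySem.List.mem_pyRange_one] at hj
    simp [show ¬ m ≤ j by omega]
  have e2 : (PySem.List.pyRange m b 1).map (fun j => if m ≤ j then (1 : Int) else 0)
      = (PySem.List.pyRange m b 1).map (fun _ => (1 : Int)) := by
    apply List.map_congr_left
    intro j hj
    rw [PySem.List.mem_pyRange_one] at hj
    simp [show m ≤ j by omega]
  rw [e1, e2, List.map_const', List.map_const', List.sum_replicate, List.sum_replicate,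
    PySem.List.length_pyRange_one, PySem.List.length_pyRange_one]
  simp only [smul_zero, zero_add, nsmul_eq_mul, mul_one]
  omega

lemma inner_eq (L n : Int) (cs : List Int) (hs : cs.Pairwise (· < ·))
    (hb : ∀ c ∈ cs, 0 ≤ c ∧ c ≤ L - n) (i : Int) (ans : Int) :
    ((PySem.List.pyRange (i + n) (L + 1) 1).foldl (fun ans2 j =>
      if cs.any (fun c => decide (i ≤ c) && decide (c + n ≤ j)) then ans2 + 1
      else ans2) ans) = ans + gN L n cs i := by
  cases hfind : cs.find? (fun c => decide (i ≤ c)) with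
  | none =>
    have hstep : ∀ (a : Int), ∀ j ∈ PySem.List.pyRange (i + n) (L + 1) 1,
        (if cs.any (fun c => decide (i ≤ c) && decide (c + n ≤ j)) then a + 1 else a) = a := by
      intro a j _
      have hany : cs.any (fun c => decide (i ≤ c) && decide (c + n ≤ j)) = false := by
        simp only [List.any_eq_false, Bool.and_eq_true, decide_eq_true_eq, not_and]
        intro c hc hic
        exact absurd (by simpa using hic) (List.find?_eq_none.mp hfind c hc)
      rw [hany]; rfl
    rw [List.foldl_ext _ (fun a _ => a) _ hstep, foldl_id]
    simp [gN, hfind]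
  | some c0 =>
    have hc0mem : c0 ∈ cs := List.mem_of_find?_eq_some hfind
    have hic0 : i ≤ c0 := by simpa using List.find?_some hfind
    have hc0b := hb c0 hc0mem
    have hany : ∀ j : Int, (cs.any fun c => decide (i ≤ c) && decide (c + n ≤ j))
        = decide (c0 + n ≤ j) := by
      intro j
      rw [Bool.eq_iff_iff]
      simp only [List.any_eq_true, Bool.and_eq_true, decide_eq_true_eq]
      constructor
      · rintro ⟨c, hc, h1, h2⟩
        have := find?_min cs hs i c0 hfind c hc h1
        omega
      · intro h; exact ⟨c0, hc0mem, hic0, h⟩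
    have hstep : ∀ (a : Int), ∀ j ∈ PySem.List.pyRange (i + n) (L + 1) 1,
        (if cs.any (fun c => decide (i ≤ c) && decide (c + n ≤ j)) then a + 1 else a)
          = a + (if c0 + n ≤ j then (1 : Int) else 0) := by
      intro a j _
      rw [hany]
      by_cases h : c0 + n ≤ j <;> simp [h]
    rw [List.foldl_ext _ _ _ hstep, PySem.List.foldl_add,
      sum_ind (i + n) (L + 1) (c0 + n) (by omega) (by omega)]
    simp only [gN, hfind]
    ring

lemma foldl_shift (L n : Int) (cs : List Int) (t p : Int) :
    (cs.foldl (fun tp c => (tp.1 + (c - tp.2) * (L - n + 1 - c), c)) (t, p)).1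
      = t + (cs.foldl (fun tp c => (tp.1 + (c - tp.2) * (L - n + 1 - c), c)) ((0 : Int), p)).1 := by
  induction cs generalizing t p with
  | nil => simp
  | cons c tl ih =>
    simp only [List.foldl_cons]
    rw [ih, ih (0 + (c - p) * (L - n + 1 - c)) c]
    ring

lemma group_sum (L n : Int) : ∀ (cs : List Int), cs.Pairwise (· < ·) → ∀ (prev : Int),
    (∀ c ∈ cs, prev < c ∧ c ≤ L - n) →
    ((PySem.List.pyRange (prev + 1) (L - n + 1) 1).map (gN L n cs)).sum
      = (cs.foldl (fun tp c => (tp.1 + (c - tp.2) * (L - n + 1 - c), c)) ((0 : Int), prev)).1 := by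
  intro cs
  induction cs with
  | nil =>
    intro _ prev _
    have : (PySem.List.pyRange (prev + 1) (L - n + 1) 1).map (gN L n [])
        = (PySem.List.pyRange (prev + 1) (L - n + 1) 1).map (fun _ => (0 : Int)) := by
      apply List.map_congr_left; intro j _; simp [gN]
    simp [this]
  | cons c tl ih =>
    intro hs prev hb
    have hc := hb c List.mem_cons_self
    rw [PySem.List.pyRange_one_append (prev + 1) (c + 1) (L - n + 1) (by omega) (by omega),
      List.map_append, List.sum_append]
    have e1 : (PySem.List.pyRange (prev + 1) (c + 1) 1).map (gN L n (c :: tl))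
        = (PySem.List.pyRange (prev + 1) (c + 1) 1).map (fun _ => L - n + 1 - c) := by
      apply List.map_congr_left
      intro j hj
      rw [PySem.List.mem_pyRange_one] at hj
      have hfind : List.find? (fun c' => decide (j ≤ c')) (c :: tl) = some c :=
        List.find?_cons_of_pos (by simp; omega)
      simp [gN, hfind]
    have e2 : (PySem.List.pyRange (c + 1) (L - n + 1) 1).map (gN L n (c :: tl))
        = (PySem.List.pyRange (c + 1) (L - n + 1) 1).map (gN L n tl) := by
      apply List.map_congr_left
      intro j hj
      rw [PySem.List.mem_pyRange_one] at hj
      have hfind : List.find? (fun c' => decide (j ≤ c')) (c :: tl)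
          = List.find? (fun c' => decide (j ≤ c')) tl :=
        List.find?_cons_of_neg (by simp; omega)
      simp only [gN, hfind]
    rw [e1, e2, ih hs.of_cons c
      (fun c' hc' => ⟨List.rel_of_pairwise_cons hs hc', (hb c' (List.mem_cons_of_mem c hc')).2⟩),
      List.map_const', List.sum_replicate, PySem.List.length_pyRange_one]
    simp only [List.foldl_cons]
    conv_rhs => rw [foldl_shift]
    have hlen : (((c + 1 - (prev + 1)).toNat : Int)) = c - prev := by omega
    rw [nsmul_eq_mul, hlen]
    ring

lemma runC_append (t : List Char) (ch : Char) :
    runC (t ++ [ch]) = if PySem.Chars.isIn [ch] "aeiou".toList then 0 else runC t + 1 := by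
  unfold runC
  rw [List.reverse_append]
  simp only [List.reverse_singleton, List.singleton_append, List.takeWhile_cons, consP]
  by_cases hi : PySem.Chars.isIn [ch] "aeiou".toList = true
  · simp [show PySem.Chars.isIn [ch] (['a','e','i','o','u'] : List Char) = true from hi]
  · simp [show PySem.Chars.isIn [ch] (['a','e','i','o','u'] : List Char) = false from by
      simpa using hi]

lemma runC_le (s : List Char) : runC s ≤ s.length := by
  have h := (List.takeWhile_prefix (l := s.reverse) consP).length_le
  simpa [runC] using h

lemma take_runC (s : List Char) : s.reverse.take (runC s) = s.reverse.takeWhile consP := by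
  obtain ⟨u, hu⟩ := List.takeWhile_prefix (l := s.reverse) consP
  conv_lhs => rw [← hu]
  unfold runC
  rw [List.take_append_of_le_length (le_refl _), List.take_length]

lemma suffix_all_consP (s : List Char) :
    ∀ x ∈ s.drop (s.length - runC s), consP x = true := by
  intro x hx
  apply List.mem_takeWhile_imp (l := s.reverse)
  rw [← take_runC, List.take_reverse, List.mem_reverse]
  exact hx

lemma take_all_imp_le_takeWhile {α : Type} (p : α → Bool) :
    ∀ (l : List α) (n : Nat), n ≤ l.length → (∀ x ∈ l.take n, p x = true) →
      n ≤ (l.takeWhile p).length := by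
  intro l
  induction l with
  | nil => intro n hn _; simpa using hn
  | cons a t ih =>
    intro n hn hall
    cases n with
    | zero => exact Nat.zero_le _
    | succ m =>
      have hpa : p a = true := hall a (by simp)
      rw [List.takeWhile_cons, if_pos hpa]
      exact Nat.succ_le_succ (ih m (by simpa using hn)
        (fun x hx => hall x (by rw [List.take_succ_cons]; exact List.mem_cons_of_mem _ hx)))

lemma all_suffix_le_runC (s : List Char) (k : Nat) (hk : k ≤ s.length)
    (h : ∀ x ∈ s.drop (s.length - k), consP x = true) : k ≤ runC s := by
  apply take_all_imp_le_takeWhile consP s.reverse k (by simpa using hk)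
  intro x hx
  apply h
  rw [List.take_reverse, List.mem_reverse] at hx
  exact hx

lemma vfB_boundary (s : List Char) (n : Int) (hn : 1 ≤ n) (hlen : n ≤ (s.length : Int)) :
    vfB s n ((s.length : Int) - n) = decide (n ≤ (runC s : Int)) := by
  have h0 : (0 : Int) ≤ (s.length : Int) - n := by omega
  have hslice : PySem.List.slice s (some ((s.length : Int) - n))
      (some ((s.length : Int) - n + n)) = s.drop (s.length - n.toNat) := by
    rw [PySem.List.slice_toNat s h0 (by omega)]
    have h1 : ((s.length : Int) - n).toNat = s.length - n.toNat := by omega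
    have h2 : ((s.length : Int) - n + n).toNat = s.length := by omega
    rw [h1, h2]
    apply List.take_of_length_le
    simp
  rw [Bool.eq_iff_iff]
  unfold vfB
  rw [hslice]
  simp only [List.all_eq_true, decide_eq_true_eq]
  constructor
  · intro h
    have hrc := all_suffix_le_runC s n.toNat (by omega) (fun x hx => by
      have hx' := h x hx; simpa [consP] using hx')
    omega
  · intro h x hx
    have hrun := runC_le s
    have hsplit : s.drop (s.length - n.toNat)
        = (s.drop (s.length - runC s)).drop ((s.length - n.toNat) - (s.length - runC s)) := by
      rw [List.drop_drop]
      congr 1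
      omega
    rw [hsplit] at hx
    have hmem : x ∈ s.drop (s.length - runC s) := List.drop_subset _ _ hx
    have := suffix_all_consP s x hmem
    simpa [consP] using this

lemma vfB_append (t : List Char) (ch : Char) (n : Int) (i : Int)
    (h0 : 0 ≤ i) (h1 : i + n ≤ (t.length : Int)) (hn : 1 ≤ n) :
    vfB (t ++ [ch]) n i = vfB t n i := by
  unfold vfB
  rw [PySem.List.slice_toNat _ h0 (by omega), PySem.List.slice_toNat _ h0 (by omega)]
  rw [List.drop_append_of_le_length (by omega)]
  rw [List.take_append_of_le_length (by simp; omega)]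

lemma enumerate_append {α : Type} : ∀ (l : List α) (x : α) (s : Int),
    PySem.List.enumerate (l ++ [x]) s
      = PySem.List.enumerate l s ++ [(s + (l.length : Int), x)] := by
  intro l
  induction l with
  | nil => intro x s; simp [PySem.List.enumerate_cons, PySem.List.enumerate_nil]
  | cons y ys ih =>
    intro x s
    rw [List.cons_append, PySem.List.enumerate_cons, ih, PySem.List.enumerate_cons,
      List.cons_append]
    have harith : s + 1 + (ys.length : Int) = s + ((y :: ys).length : Int) := by
      simp only [List.length_cons]; push_cast; ring
    rw [harith]


lemma startsB_eq (n : Int) (hn : 1 ≤ n) : ∀ (s : List Char),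
    ((PySem.List.enumerate s 0).foldl (fun st p =>
      (if PySem.Chars.isIn [p.2] "aeiou".toList then 0 else st.1 + 1,
       if n ≤ (if PySem.Chars.isIn [p.2] "aeiou".toList then 0 else st.1 + 1) then
         st.2 ++ [p.1 - n + 1]
       else st.2)) ((0 : Int), ([] : List Int)))
    = (((runC s : Nat) : Int),
       (PySem.List.pyRange 0 ((s.length : Int) - n + 1) 1).filter (vfB s n)) := by
  intro s
  induction s using List.reverseRecOn with
  | nil =>
    rw [PySem.List.enumerate_nil, List.foldl_nil,
      PySem.List.pyRange_one_eq_nil (by simp; omega), List.filter_nil]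
    simp [runC]
  | append_singleton t ch ih =>
    rw [enumerate_append, List.foldl_append, ih, List.foldl_cons, List.foldl_nil]
    have hrct := runC_le t
    have hrct' : ((runC t : Nat) : Int) ≤ (t.length : Int) := by exact_mod_cast hrct
    have hfilter_old : (PySem.List.pyRange 0 ((t.length : Int) - n + 1) 1).filter
          (vfB (t ++ [ch]) n)
        = (PySem.List.pyRange 0 ((t.length : Int) - n + 1) 1).filter (vfB t n) := by
      apply List.filter_congr
      intro i hi
      rw [PySem.List.mem_pyRange_one] at hi
      exact vfB_append t ch n i (by omega) (by omega) hn
    have hlen' : (((t ++ [ch]).length : Nat) : Int) = (t.length : Int) + 1 := by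
      simp
    by_cases hv : PySem.Chars.isIn [ch] "aeiou".toList
    · -- ch is a vowel: run resets to 0, nothing appended
      have hrun : runC (t ++ [ch]) = 0 := by rw [runC_append, if_pos hv]
      simp only [if_pos hv]
      rw [if_neg (by omega : ¬ n ≤ (0 : Int))]
      simp only [Prod.mk.injEq]
      constructor
      · simp [hrun]
      · by_cases hb : 0 ≤ (t.length : Int) + 1 - n
        · have hbdry : vfB (t ++ [ch]) n ((t.length : Int) - n + 1) = false := by
            have hB := vfB_boundary (t ++ [ch]) n hn (by rw [hlen']; omega)
            rw [hlen'] at hB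
            rw [show (t.length : Int) - n + 1 = (t.length : Int) + 1 - n by ring, hB, hrun]
            simp; omega
          conv_rhs => rw [hlen',
            show (t.length : Int) + 1 - n + 1 = ((t.length : Int) - n + 1) + 1 by ring,
            PySem.List.pyRange_one_succ_right (show (0:Int) ≤ (t.length : Int) - n + 1 by omega),
            List.filter_append, hfilter_old]
          simp [hbdry]
        · conv_rhs => rw [hlen',
            PySem.List.pyRange_one_eq_nil (show (t.length : Int) + 1 - n + 1 ≤ 0 by omega)]
          rw [PySem.List.pyRange_one_eq_nil (show (t.length : Int) - n + 1 ≤ 0 by omega)]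
          simp
    · -- ch is a consonant: run extends by one
      have hrun : runC (t ++ [ch]) = runC t + 1 := by rw [runC_append, if_neg hv]
      simp only [if_neg hv]
      refine Prod.ext ?_ ?_
      · rw [hrun]
        push_cast
        ring
      ·
        by_cases hb : 0 ≤ (t.length : Int) + 1 - n
        · have hbdry : vfB (t ++ [ch]) n ((t.length : Int) - n + 1)
              = decide (n ≤ ((runC t : Nat) : Int) + 1) := by
            have hB := vfB_boundary (t ++ [ch]) n hn (by rw [hlen']; omega)
            rw [hlen'] at hB
            rw [show (t.length : Int) - n + 1 = (t.length : Int) + 1 - n by ring, hB, hrun]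
            simp only [decide_eq_decide]
            push_cast
            omega
          conv_rhs => rw [hlen',
            show (t.length : Int) + 1 - n + 1 = ((t.length : Int) - n + 1) + 1 by ring,
            PySem.List.pyRange_one_succ_right (show (0:Int) ≤ (t.length : Int) - n + 1 by omega),
            List.filter_append, hfilter_old]
          by_cases hle : n ≤ ((runC t : Nat) : Int) + 1
          · rw [if_pos hle]
            rw [List.filter_cons, hbdry, if_pos (by simpa using hle), List.filter_nil]
            simp
          · rw [if_neg hle]
            rw [List.filter_cons, hbdry, if_neg (by simpa using hle), List.filter_nil,
              List.append_nil]
        · rw [if_neg (by omega : ¬ n ≤ ((runC t : Nat) : Int) + 1)]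
          conv_rhs => rw [hlen',
            PySem.List.pyRange_one_eq_nil (show (t.length : Int) + 1 - n + 1 ≤ 0 by omega)]
          rw [PySem.List.pyRange_one_eq_nil (show (t.length : Int) - n + 1 ≤ 0 by omega)]
          simp

lemma core (name : String) (n : Int) (hn : 1 ≤ n) :
    nvalue name n = nvalue_alt name n := by
  simp only [nvalue, nvalue_alt]
  rw [consA_eq name.toList n hn, startsB_eq n hn name.toList]
  simp only []
  set L : Int := (name.toList.length : Int) with hL
  set cs : List Int := (PySem.List.pyRange 0 (L - n + 1) 1).filter (vfB name.toList n) with hcs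
  have hpair : cs.Pairwise (· < ·) :=
    (PySem.List.pairwise_lt_pyRange_one 0 (L - n + 1)).filter _
  have hbnd : ∀ c ∈ cs, 0 ≤ c ∧ c ≤ L - n := by
    intro c hc
    have := (List.mem_filter.mp hc).1
    rw [PySem.List.mem_pyRange_one] at this
    omega
  rw [List.foldl_ext _ (fun ans i => ans + gN L n cs i) _
    (fun a i _ => inner_eq L n cs hpair hbnd i a)]
  rw [PySem.List.foldl_add]
  have hg := group_sum L n cs hpair (-1)
    (fun c hc => ⟨by have := (hbnd c hc).1; omega, (hbnd c hc).2⟩)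
  have h0 : (-1 : Int) + 1 = 0 := by norm_num
  rw [h0] at hg
  rw [hg]
  ring

-- ===== VERDICT (by name: the statement is the Claim_ definition above) =====
theorem nvalue_spec : Claim_equal_nvalue := by
  intro name n _ hpre
  exact core name n hpre
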